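-- pv_equiv track=rewrite | github.com/JoJoWitness/Progra-I | Test/Proyecto1.py | orderingProcess
-- ===== SOURCE A (Python) =====
-- def orderingProcess(list):
--     words = []
--     numbers = []
--     for element in list:
--         if element.replace('-', '').isdigit():
--             numbers.append(element)
--         else:
--             words.append(element)
--
--     ordered_numbers = sorted(numbers, key=assignSign)
--     ordered_words = sorted(words, key=str.lower)
--     ordered_list = []
--     index_word = 0
--     index_number = 0
--     for element in list:
--         if element.replace('-', '').isdigit():
--             ordered_list.append(ordered_numbers[index_number])
--             index_number += 1
--         else:
--             ordered_list.append(ordered_words[index_word])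
--             index_word += 1
--
--     return ordered_list
--
-- def assignSign(num):
--     if '-' not in num:
--         return int(num)
--     else:
--         unsigned_number = int(num[1:])
--         signed_number = 0 - unsigned_number
--         return signed_number
-- ===== SOURCE B (Python) =====
-- def assignSign(num):
--     if '-' not in num:
--         return int(num)
--     else:
--         unsigned_number = int(num[1:])
--         signed_number = 0 - unsigned_number
--         return signed_number
--
-- def orderingProcess(list):
--     n = len(list)
--
--     def cat(i):
--         return 0 if list[i].replace('-', '').isdigit() else 1
--
--     def key(i):
--         e = list[i]
--         if e.replace('-', '').isdigit():
--             return (0, assignSign(e))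
--         else:
--             return (1, e.lower())
--
--     # argsort twice: slot order (stable by category) and value order (category, then value key)
--     slots = sorted(range(n), key=cat)
--     ranked = sorted(range(n), key=key)
--     result = [None] * n
--     for s, r in zip(slots, ranked):
--         result[s] = list[r]
--     return result
-- ===== Notes on version B (the rewrite author's own statement) =====
-- stated objective: alternative
-- what changed: B never builds the two value lists or re-scans the input: it argsorts range(n) twice - once stably by category (0=number, 1=word) for the slot order, once by a lexicographic (category, assignSign/lower) composite key for the value order - and scatters result[slots[j]] = list[ranked[j]] into a pre-allocated list.
import Mathlib
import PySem

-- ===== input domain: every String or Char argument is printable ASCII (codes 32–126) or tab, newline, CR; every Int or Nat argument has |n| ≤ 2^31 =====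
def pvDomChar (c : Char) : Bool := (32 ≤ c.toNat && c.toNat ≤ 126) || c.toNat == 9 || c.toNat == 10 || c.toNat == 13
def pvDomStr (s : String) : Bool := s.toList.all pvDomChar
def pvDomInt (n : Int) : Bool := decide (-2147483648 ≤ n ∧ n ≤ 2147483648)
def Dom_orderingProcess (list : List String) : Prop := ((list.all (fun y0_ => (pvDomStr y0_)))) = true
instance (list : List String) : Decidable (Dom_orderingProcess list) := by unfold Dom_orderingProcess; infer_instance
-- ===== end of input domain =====

-- B replaces A's partition-into-two-value-lists + counter interleave by a double argsort of
-- range(n): a stable sort of indices by category gives the slot order, one sort of indices by a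
-- lexicographic (category, key) pair gives the value order, and the result is a scatter
-- result[slots[j]] = list[ranked[j]] (objective: alternative decomposition, same cost).

-- ===== PORT A =====

-- the numeric test `element.replace('-', '').isdigit()` shared by both programs
def pvNum (e : String) : Bool := PySem.Str.strIsdigit (PySem.Str.replace e "-" "")

-- assignSign(num); `int(…)` via ofStr?.getD 0 — the default is unreachable inside Pre_
-- (Python raises ValueError exactly where ofStr? is none, and Pre_ excludes those inputs)
def assignSignL (num : String) : Int :=
  if ¬ (PySem.Str.isIn "-" num = true) then (PySem.Int.ofStr? num).getD 0
  else 0 - (PySem.Int.ofStr? (PySem.Str.slice num (some 1) none)).getD 0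

def orderingProcess (list : List String) : List String :=
  -- first loop: build words and numbers by appending
  let wn : List String × List String :=
    list.foldl (fun s e => if pvNum e then (s.1, s.2 ++ [e]) else (s.1 ++ [e], s.2)) ([], [])
  let ordered_numbers := PySem.List.sorted wn.2 assignSignL false
  let ordered_words := PySem.List.sorted wn.1 PySem.Str.lower false
  -- second loop: state (ordered_list, index_word, index_number); the indices are the two
  -- nonnegative Python counters, kept as Nat; `xs[i]` via getElem?.getD "" — always in range
  let fin : List String × Nat × Nat :=
    list.foldl (fun s e =>
      if pvNum e then (s.1 ++ [ordered_numbers[s.2.2]?.getD ""], s.2.1, s.2.2 + 1)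
      else (s.1 ++ [ordered_words[s.2.1]?.getD ""], s.2.1 + 1, s.2.2)) ([], 0, 0)
  fin.1

-- ===== PORT B =====

-- cat(i): 0 for a numeric-looking element, 1 otherwise; list[i] via pyGet? (i is in range)
def pvCat (list : List String) (i : Int) : Int :=
  if pvNum ((PySem.List.pyGet? list i).getD "") then 0 else 1

-- key(i): the Python tuple (0, assignSign(e)) / (1, e.lower()) — a lexicographic sum,
-- since the two payload types differ; tuple comparison = Sum.Lex comparison here
def pvKeyB (list : List String) (i : Int) : Lex (Int ⊕ String) :=
  let e := (PySem.List.pyGet? list i).getD ""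
  if pvNum e then toLex (Sum.inl (assignSignL e)) else toLex (Sum.inr (PySem.Str.lower e))

def orderingProcess_alt (list : List String) : List String :=
  let n := list.length
  -- slots = sorted(range(n), key=cat); ranked = sorted(range(n), key=key)
  let slots := PySem.List.sorted (PySem.List.pyRange 0 (n : Int)) (pvCat list) false
  let ranked := PySem.List.sorted (PySem.List.pyRange 0 (n : Int)) (pvKeyB list) false
  -- result = [None]*n, then result[s] = list[r] for (s, r) in zip(slots, ranked)
  let result := List.replicate n ""
  (slots.zip ranked).foldl
    (fun r sr => r.set sr.1.toNat ((PySem.List.pyGet? list sr.2).getD "")) result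

-- ===== PRECONDITION & SPEC =====
-- Pre_ excludes exactly the inputs on which Python A (and Python B alike) raises ValueError:
-- an element like '5-' or '55-5' that is classified numeric (digits survive stripping '-')
-- but whose int(num[1:]) in assignSign is not a valid integer literal.
def Pre_orderingProcess (list : List String) : Prop :=
  ∀ e ∈ list, pvNum e = true → PySem.Str.isIn "-" e = true →
    (PySem.Int.ofStr? (PySem.Str.slice e (some 1) none)).isSome = true
instance (list : List String) : Decidable (Pre_orderingProcess list) := by
  unfold Pre_orderingProcess; infer_instance

def pvWitness_orderingProcess : List String := ["10", "banana", "-3", "Apple", "007"]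

def Spec_orderingProcess (list : List String) (out : List String) : Prop := out = orderingProcess_alt list
instance (list : List String) (out : List String) : Decidable (Spec_orderingProcess list out) := by unfold Spec_orderingProcess; infer_instance

-- ===== CLAIM (what is proved, stated in full; the proofs are below) =====
def Claim_equal_orderingProcess : Prop := ∀ (list : List String), Dom_orderingProcess list → Pre_orderingProcess list → Spec_orderingProcess list (orderingProcess list)

-- ===== LEMMAS AND PROOFS =====

-- common interleaving skeleton: place the words ws and the numbers ns back into the slots of l
def pvItl : List String → List String → List String → List String
  | [], _, _ => []
  | e :: es, ws, ns =>
    if pvNum e then ns.headD "" :: pvItl es ws ns.tail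
    else ws.headD "" :: pvItl es ws.tail ns

-- A's first loop builds (filter !pvNum, filter pvNum)
theorem pvPartA (l : List String) (a b : List String) :
    l.foldl (fun s e => if pvNum e then (s.1, s.2 ++ [e]) else (s.1 ++ [e], s.2)) (a, b)
      = (a ++ l.filter (fun e => !pvNum e), b ++ l.filter pvNum) := by
  induction l generalizing a b with
  | nil => simp
  | cons e es ih =>
    by_cases h : pvNum e = true <;> simp [List.foldl_cons, h, ih]

-- A's second loop from counters (iw, inn) produces acc ++ the interleaving of the suffixes
theorem pvLoopA (ow on : List String) (l : List String) (acc : List String) (iw inn : Nat) :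
    (l.foldl (fun s e =>
        if pvNum e then (s.1 ++ [on[s.2.2]?.getD ""], s.2.1, s.2.2 + 1)
        else (s.1 ++ [ow[s.2.1]?.getD ""], s.2.1 + 1, s.2.2)) (acc, iw, inn)).1
      = acc ++ pvItl l (ow.drop iw) (on.drop inn) := by
  induction l generalizing acc iw inn with
  | nil => simp [pvItl]
  | cons e es ih =>
    by_cases h : pvNum e = true
    · simp only [List.foldl_cons, h, if_pos, ih, pvItl, List.tail_drop]
      simp [List.headD_eq_head?_getD, List.head?_drop]
    · simp only [List.foldl_cons, h, if_neg, Bool.false_eq_true, not_false_iff, ih, pvItl,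
        List.tail_drop]
      simp [List.headD_eq_head?_getD, List.head?_drop]

-- the number / word position tables, as structural recursions from a starting index k
def pvNPos : List String → Nat → List Int
  | [], _ => []
  | e :: es, k => if pvNum e then (k : Int) :: pvNPos es (k + 1) else pvNPos es (k + 1)

def pvWPos : List String → Nat → List Int
  | [], _ => []
  | e :: es, k => if pvNum e then pvWPos es (k + 1) else (k : Int) :: pvWPos es (k + 1)

theorem pvNPos_ge (l : List String) (k : Nat) : ∀ i ∈ pvNPos l k, (k : Int) ≤ i := by
  induction l generalizing k with
  | nil => simp [pvNPos]
  | cons e es ih =>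
    intro i hi
    simp only [pvNPos] at hi
    split at hi
    · rcases List.mem_cons.mp hi with h | h
      · omega
      · have := ih (k + 1) i h; push_cast at this ⊢; omega
    · have := ih (k + 1) i hi; push_cast at this ⊢; omega

-- reading the whole list at the number positions gives exactly the numeric elements, in order
theorem pvNPos_map (l0 : List String) (k : Nat) (l : List String) (hl : l0.drop k = l) :
    (pvNPos l k).map (fun i => (PySem.List.pyGet? l0 i).getD "") = l.filter pvNum := by
  induction l generalizing k with
  | nil => simp [pvNPos]
  | cons e es ih =>
    have hget : l0[k]? = some e := by
      rw [← List.head?_drop, hl]; rfl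
    have hdrop : l0.drop (k + 1) = es := by
      rw [← List.tail_drop, hl]; rfl
    by_cases h : pvNum e = true <;>
      simp [pvNPos, h, PySem.List.pyGet?_natCast, hget, ih (k + 1) hdrop]

theorem pvWPos_map (l0 : List String) (k : Nat) (l : List String) (hl : l0.drop k = l) :
    (pvWPos l k).map (fun i => (PySem.List.pyGet? l0 i).getD "") = l.filter (fun e => !pvNum e) := by
  induction l generalizing k with
  | nil => simp [pvWPos]
  | cons e es ih =>
    have hget : l0[k]? = some e := by
      rw [← List.head?_drop, hl]; rfl
    have hdrop : l0.drop (k + 1) = es := by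
      rw [← List.tail_drop, hl]; rfl
    by_cases h : pvNum e = true <;>
      simp [pvWPos, h, PySem.List.pyGet?_natCast, hget, ih (k + 1) hdrop]

-- take/drop of a single set, used to peel one slot off the buffer
theorem pvTake (r : List String) (k : Nat) (hk : k < r.length) (v : String) :
    (r.set k v).take (k + 1) = r.take k ++ [v] := by
  rw [List.set_eq_take_append_cons_drop, if_pos hk, List.take_append]
  simp [List.take_take, List.length_take, Nat.min_eq_left hk.le]

theorem pvDrop (r : List String) (k m : Nat) (hk : k < r.length) (v : String) :
    (r.set k v).drop (k + 1 + m) = r.drop (k + 1 + m) := by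
  rw [List.set_eq_take_append_cons_drop, if_pos hk, List.drop_append]
  have h1 : List.drop (k + 1 + m) (List.take k r) = [] := by
    apply List.drop_eq_nil_of_le; simp [List.length_take]; omega
  rw [h1, List.length_take, Nat.min_eq_left hk.le, show k + 1 + m - k = m + 1 by omega]
  simp [List.drop_drop]

-- a set at an index no scatter step touches commutes with the whole scatter
theorem pvSetAll_set_comm (ps : List (Int × String)) (r : List String) (k : Nat) (w : String)
    (h : ∀ p ∈ ps, p.1.toNat ≠ k) :
    (ps.foldl (fun r iv => r.set iv.1.toNat iv.2) r).set k w
      = ps.foldl (fun r iv => r.set iv.1.toNat iv.2) (r.set k w) := by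
  induction ps generalizing r with
  | nil => rfl
  | cons p ps ih =>
    simp only [List.foldl_cons]
    rw [ih _ (fun q hq => h q (List.mem_cons_of_mem _ hq)),
        List.set_comm _ _ (h p (List.mem_cons_self ..))]

-- the scatter: numbers written first, then words, over a buffer r from offset k
theorem pvScatter (l : List String) (on ow : List String) (r : List String) (k : Nat)
    (hn : on.length = (l.filter pvNum).length)
    (hw : ow.length = (l.filter (fun e => !pvNum e)).length)
    (hr : k + l.length ≤ r.length) :
    ((pvWPos l k).zip ow).foldl (fun r iv => r.set iv.1.toNat iv.2)
        (((pvNPos l k).zip on).foldl (fun r iv => r.set iv.1.toNat iv.2) r)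
      = r.take k ++ pvItl l ow on ++ r.drop (k + l.length) := by
  induction l generalizing on ow r k with
  | nil => simp [pvNPos, pvWPos, pvItl]
  | cons e es ih =>
    have hk : k < r.length := by simp at hr; omega
    by_cases h : pvNum e = true
    · -- e goes to the numbers: on = v :: on'
      obtain ⟨v, on', rfl⟩ : ∃ v on', on = v :: on' := by
        cases on with
        | nil => simp [h] at hn
        | cons v t => exact ⟨v, t, rfl⟩
      simp only [pvNPos, pvWPos, h, if_pos, List.zip_cons_cons, List.foldl_cons,
        Int.toNat_natCast]
      rw [ih on' ow (r.set k v) (k + 1)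
            (by simpa [List.filter_cons, h] using hn)
            (by simpa [List.filter_cons, h] using hw)
            (by simp at hr ⊢; omega),
          pvTake r k hk v, pvDrop r k es.length hk v]
      simp only [pvItl, h, if_pos, List.headD_cons, List.tail_cons, List.length_cons,
        List.append_assoc, List.cons_append, List.nil_append]
      rw [show k + (es.length + 1) = k + 1 + es.length by omega]
    · -- e goes to the words: ow = w :: ow'
      obtain ⟨w, ow', rfl⟩ : ∃ w ow', ow = w :: ow' := by
        cases ow with
        | nil => simp [h] at hw
        | cons w t => exact ⟨w, t, rfl⟩
      simp only [pvNPos, pvWPos, h, Bool.false_eq_true, if_neg, not_false_iff,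
        List.zip_cons_cons, List.foldl_cons, Int.toNat_natCast]
      rw [pvSetAll_set_comm _ r k w
            (by intro p hp hctr
                have := pvNPos_ge es (k + 1) p.1 (List.of_mem_zip (by simpa using hp)).1
                have hp0 : (0 : Int) ≤ p.1 := by push_cast at this; omega
                omega),
          ih on ow' (r.set k w) (k + 1)
            (by simpa [List.filter_cons, h] using hn)
            (by simpa [List.filter_cons, h] using hw)
            (by simp at hr ⊢; omega),
          pvTake r k hk w, pvDrop r k es.length hk w]
      simp only [pvItl, h, Bool.false_eq_true, if_neg, not_false_iff, List.headD_cons,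
        List.tail_cons, List.length_cons, List.append_assoc, List.cons_append, List.nil_append]
      rw [show k + (es.length + 1) = k + 1 + es.length by omega]

-- ===== insertion-sort structure lemmas for B (stability of the two argsorts) =====

-- inserting past a block every member of which compares 'after' x
theorem pvInsertBy_append_left {α : Type} (p : α → α → Bool) (x : α) (la lb : List α)
    (h : ∀ y ∈ lb, p x y = true) :
    PySem.List.insertBy p x (la ++ lb) = PySem.List.insertBy p x la ++ lb := by
  induction la with
  | nil =>
    cases lb with
    | nil => rfl
    | cons y ys => simp [PySem.List.insertBy, h y (List.mem_cons_self ..)]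
  | cons a la ih =>
    by_cases hp : p x a = true <;> simp [PySem.List.insertBy, hp, ih]

-- inserting through a block no member of which compares 'after' x
theorem pvInsertBy_append_right {α : Type} (p : α → α → Bool) (x : α) (la lb : List α)
    (h : ∀ y ∈ la, p x y = false) :
    PySem.List.insertBy p x (la ++ lb) = la ++ PySem.List.insertBy p x lb := by
  induction la with
  | nil => rfl
  | cons a la ih =>
    have := h a (List.mem_cons_self ..)
    simp only [List.cons_append, PySem.List.insertBy, this, Bool.false_eq_true, if_neg,
      not_false_iff]
    rw [ih (fun y hy => h y (List.mem_cons_of_mem _ hy))]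

-- a stable sort by a key that strictly separates the p-block from the ¬p-block splits
theorem pvSortedSplitAux {α κ : Type} [LinearOrder κ] (key : α → κ) (p : α → Bool)
    (hsep : ∀ a b, p a = true → p b = false → key a < key b)
    (xs accA accB : List α)
    (hA : ∀ a ∈ accA, p a = true) (hB : ∀ b ∈ accB, p b = false) :
    xs.foldl (fun acc x => PySem.List.insertBy (fun a b => decide (key a < key b)) x acc)
        (accA ++ accB)
      = (xs.filter p).foldl
          (fun acc x => PySem.List.insertBy (fun a b => decide (key a < key b)) x acc) accA
        ++ (xs.filter (fun a => !p a)).foldl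
          (fun acc x => PySem.List.insertBy (fun a b => decide (key a < key b)) x acc) accB := by
  induction xs generalizing accA accB with
  | nil => simp
  | cons x xs ih =>
    by_cases hp : p x = true
    · rw [List.foldl_cons,
        pvInsertBy_append_left _ x accA accB
          (fun y hy => by simp [hsep x y hp (hB y hy)]),
        ih (PySem.List.insertBy _ x accA) accB
          (fun a ha => by
            rcases (PySem.List.mem_insertBy _ x a accA).mp ha with rfl | ha
            · exact hp
            · exact hA a ha) hB]
      simp [hp]
    · have hp' : p x = false := by simpa using hp
      rw [List.foldl_cons,
        pvInsertBy_append_right _ x accA accB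
          (fun y hy => by simp [not_lt.mpr (le_of_lt (hsep y x (hA y hy) hp'))]),
        ih accA (PySem.List.insertBy _ x accB) hA
          (fun b hb => by
            rcases (PySem.List.mem_insertBy _ x b accB).mp hb with rfl | hb
            · exact hp'
            · exact hB b hb)]
      simp [hp']

theorem pvSortedSplit {α κ : Type} [LinearOrder κ] (key : α → κ) (p : α → Bool)
    (hsep : ∀ a b, p a = true → p b = false → key a < key b) (xs : List α) :
    PySem.List.sorted xs key false
      = PySem.List.sorted (xs.filter p) key false
        ++ PySem.List.sorted (xs.filter (fun a => !p a)) key false := by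
  rw [PySem.List.sorted_eq_foldl_insertBy, PySem.List.sorted_eq_foldl_insertBy,
    PySem.List.sorted_eq_foldl_insertBy]
  exact pvSortedSplitAux key p hsep xs [] [] (by simp) (by simp)

-- inserting with a key that factors through f commutes with mapping f
theorem pvInsertBy_map {α β : Type} (f : α → β) (q : β → β → Bool) (x : α) (ys : List α) :
    (PySem.List.insertBy (fun a b => q (f a) (f b)) x ys).map f
      = PySem.List.insertBy q (f x) (ys.map f) := by
  induction ys with
  | nil => rfl
  | cons y ys ih =>
    by_cases hq : q (f x) (f y) = true <;> simp [PySem.List.insertBy, hq, ih]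

theorem pvSorted_map_aux {α β κ : Type} [LinearOrder κ] (f : α → β) (key : β → κ)
    (xs : List α) (acc : List α) :
    (xs.foldl (fun acc x =>
        PySem.List.insertBy (fun a b => decide (key (f a) < key (f b))) x acc) acc).map f
      = (xs.map f).foldl
          (fun acc x => PySem.List.insertBy (fun a b => decide (key a < key b)) x acc)
          (acc.map f) := by
  induction xs generalizing acc with
  | nil => rfl
  | cons x xs ih =>
    rw [List.foldl_cons, ih,
      pvInsertBy_map f (fun a b => decide (key a < key b)) x acc, List.map_cons,
      List.foldl_cons]

-- sorting by key ∘ f then mapping f = mapping f then sorting by key (stability transported)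
theorem pvSorted_map {α β κ : Type} [LinearOrder κ] (f : α → β) (key : β → κ) (xs : List α) :
    (PySem.List.sorted xs (fun a => key (f a)) false).map f
      = PySem.List.sorted (xs.map f) key false := by
  rw [PySem.List.sorted_eq_foldl_insertBy, PySem.List.sorted_eq_foldl_insertBy]
  exact pvSorted_map_aux f key xs []

-- two keys whose strict comparisons agree on the list sort it identically
theorem pvInsertBy_congr {α : Type} (p q : α → α → Bool) (x : α) (ys : List α)
    (h : ∀ y ∈ ys, p x y = q x y) :
    PySem.List.insertBy p x ys = PySem.List.insertBy q x ys := by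
  induction ys with
  | nil => rfl
  | cons y ys ih =>
    have hy := h y (List.mem_cons_self ..)
    by_cases hq : q x y = true <;>
      simp [PySem.List.insertBy, hy, hq, ih (fun z hz => h z (List.mem_cons_of_mem _ hz))]

theorem pvSorted_congr_aux {α κ1 κ2 : Type} [LinearOrder κ1] [LinearOrder κ2]
    (k1 : α → κ1) (k2 : α → κ2) (xs acc : List α)
    (h : ∀ a b, (a ∈ xs ∨ a ∈ acc) → (b ∈ xs ∨ b ∈ acc) →
      decide (k1 a < k1 b) = decide (k2 a < k2 b)) :
    xs.foldl (fun acc x => PySem.List.insertBy (fun a b => decide (k1 a < k1 b)) x acc) acc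
      = xs.foldl (fun acc x => PySem.List.insertBy (fun a b => decide (k2 a < k2 b)) x acc) acc := by
  induction xs generalizing acc with
  | nil => rfl
  | cons x xs ih =>
    rw [List.foldl_cons, List.foldl_cons,
      pvInsertBy_congr (fun a b => decide (k1 a < k1 b)) (fun a b => decide (k2 a < k2 b)) x acc
        (fun y hy => h x y (Or.inl (List.mem_cons_self ..)) (Or.inr hy)),
      ih (PySem.List.insertBy _ x acc)
        (fun a b ha hb => by
          refine h a b ?_ ?_
          · rcases ha with ha | ha
            · exact Or.inl (List.mem_cons_of_mem _ ha)
            · rcases (PySem.List.mem_insertBy _ x a acc).mp ha with rfl | ha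
              · exact Or.inl (List.mem_cons_self ..)
              · exact Or.inr ha
          · rcases hb with hb | hb
            · exact Or.inl (List.mem_cons_of_mem _ hb)
            · rcases (PySem.List.mem_insertBy _ x b acc).mp hb with rfl | hb
              · exact Or.inl (List.mem_cons_self ..)
              · exact Or.inr hb)]

theorem pvSorted_congr {α κ1 κ2 : Type} [LinearOrder κ1] [LinearOrder κ2]
    (k1 : α → κ1) (k2 : α → κ2) (xs : List α)
    (h : ∀ a ∈ xs, ∀ b ∈ xs, decide (k1 a < k1 b) = decide (k2 a < k2 b)) :
    PySem.List.sorted xs k1 false = PySem.List.sorted xs k2 false := by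
  rw [PySem.List.sorted_eq_foldl_insertBy, PySem.List.sorted_eq_foldl_insertBy]
  exact pvSorted_congr_aux k1 k2 xs []
    (fun a b ha hb => h a (by simpa using ha) b (by simpa using hb))

-- filtering range(n) by the numeric test at each index gives the position tables
theorem pvRange_filter (l0 : List String) (k : Nat) (l : List String) (hl : l0.drop k = l) :
    ((List.range' k l.length).map (fun (j : Nat) => (j : Int))).filter
        (fun i => pvNum ((PySem.List.pyGet? l0 i).getD "")) = pvNPos l k
    ∧ ((List.range' k l.length).map (fun (j : Nat) => (j : Int))).filter
        (fun i => !pvNum ((PySem.List.pyGet? l0 i).getD "")) = pvWPos l k := by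
  induction l generalizing k with
  | nil => simp [pvNPos, pvWPos]
  | cons e es ih =>
    have hget : l0[k]? = some e := by
      rw [← List.head?_drop, hl]; rfl
    have hdrop : l0.drop (k + 1) = es := by
      rw [← List.tail_drop, hl]; rfl
    obtain ⟨ih1, ih2⟩ := ih (k + 1) hdrop
    have hr : List.range' k (e :: es).length = k :: List.range' (k + 1) es.length :=
      List.range'_succ
    by_cases h : pvNum e = true <;>
      constructor <;>
        rw [hr, List.map_cons, List.filter_cons] <;>
        simp [PySem.List.pyGet?_natCast, hget, h, pvNPos, pvWPos, ih1, ih2]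

-- every member of pvNPos / pvWPos is a numeric / non-numeric in-range index
theorem pvNPos_num (l0 : List String) (k : Nat) (l : List String) (hl : l0.drop k = l) :
    ∀ i ∈ pvNPos l k, pvNum ((PySem.List.pyGet? l0 i).getD "") = true := by
  intro i hi
  have := pvNPos_map l0 k l hl
  have hmem : (PySem.List.pyGet? l0 i).getD "" ∈ l.filter pvNum := by
    rw [← this]; exact List.mem_map_of_mem hi
  exact (List.mem_filter.mp hmem).2

theorem pvWPos_num (l0 : List String) (k : Nat) (l : List String) (hl : l0.drop k = l) :
    ∀ i ∈ pvWPos l k, pvNum ((PySem.List.pyGet? l0 i).getD "") = false := by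
  intro i hi
  have := pvWPos_map l0 k l hl
  have hmem : (PySem.List.pyGet? l0 i).getD "" ∈ l.filter (fun e => !pvNum e) := by
    rw [← this]; exact List.mem_map_of_mem hi
  simpa using (List.mem_filter.mp hmem).2

-- the two ports, each reduced to the common interleaving normal form
theorem pvA_eq (l : List String) :
    orderingProcess l
      = pvItl l (PySem.List.sorted (l.filter (fun e => !pvNum e)) PySem.Str.lower false)
               (PySem.List.sorted (l.filter pvNum) assignSignL false) := by
  unfold orderingProcess
  rw [pvPartA l [] []]
  simp only [List.nil_append]
  rw [pvLoopA]
  simp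

theorem pvB_eq (l : List String) :
    orderingProcess_alt l
      = pvItl l (PySem.List.sorted (l.filter (fun e => !pvNum e)) PySem.Str.lower false)
               (PySem.List.sorted (l.filter pvNum) assignSignL false) := by
  simp only [orderingProcess_alt]
  have hrange : PySem.List.pyRange 0 (l.length : Int)
      = (List.range' 0 l.length).map (fun (j : Nat) => (j : Int)) := by
    rw [PySem.List.pyRange_zero_natCast, List.range_eq_range']
  obtain ⟨hfn, hfw⟩ := pvRange_filter l 0 l (by simp)
  -- slots: a stable sort by the two-valued category = number positions ++ word positions
  have hslots : PySem.List.sorted (PySem.List.pyRange 0 (l.length : Int)) (pvCat l) false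
      = pvNPos l 0 ++ pvWPos l 0 := by
    rw [hrange, pvSortedSplit (pvCat l)
        (fun i => pvNum ((PySem.List.pyGet? l i).getD ""))
        (fun a b ha hb => by simp [pvCat, ha, hb]), hfn, hfw,
      PySem.List.sorted_eq_self_of_pairwise _ _
        (List.Pairwise.imp (fun _ => le_of_eq (by omega))
          (List.pairwise_of_forall_mem_list
            (fun a ha b hb => by
              simp [pvCat, pvNPos_num l 0 l (by simp) a ha,
                pvNPos_num l 0 l (by simp) b hb]))),
      PySem.List.sorted_eq_self_of_pairwise _ _
        (List.Pairwise.imp (fun _ => le_of_eq (by omega))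
          (List.pairwise_of_forall_mem_list
            (fun a ha b hb => by
              simp [pvCat, pvWPos_num l 0 l (by simp) a ha,
                pvWPos_num l 0 l (by simp) b hb])))]
  -- ranked: the composite sort = sorted number indices ++ sorted word indices
  have hranked : (PySem.List.sorted (PySem.List.pyRange 0 (l.length : Int)) (pvKeyB l) false).map
        (fun i => (PySem.List.pyGet? l i).getD "")
      = PySem.List.sorted (l.filter pvNum) assignSignL false
        ++ PySem.List.sorted (l.filter (fun e => !pvNum e)) PySem.Str.lower false := by
    rw [hrange, pvSortedSplit (pvKeyB l)
        (fun i => pvNum ((PySem.List.pyGet? l i).getD ""))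
        (fun a b ha hb => by
          simp only [pvKeyB, ha, hb, if_pos, Bool.false_eq_true, if_neg, not_false_iff]
          exact Sum.Lex.inl_lt_inr _ _), hfn, hfw, List.map_append,
      pvSorted_congr (pvKeyB l)
        (fun i => assignSignL ((PySem.List.pyGet? l i).getD "")) (pvNPos l 0)
        (fun a ha b hb => by
          simp only [pvKeyB, pvNPos_num l 0 l (by simp) a ha,
            pvNPos_num l 0 l (by simp) b hb, if_pos]
          simp),
      pvSorted_congr (pvKeyB l)
        (fun i => PySem.Str.lower ((PySem.List.pyGet? l i).getD "")) (pvWPos l 0)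
        (fun a ha b hb => by
          simp only [pvKeyB, pvWPos_num l 0 l (by simp) a ha,
            pvWPos_num l 0 l (by simp) b hb, Bool.false_eq_true, if_neg, not_false_iff]
          simp),
      pvSorted_map (fun i => (PySem.List.pyGet? l i).getD "") assignSignL,
      pvSorted_map (fun i => (PySem.List.pyGet? l i).getD "") PySem.Str.lower,
      pvNPos_map l 0 l (by simp), pvWPos_map l 0 l (by simp)]
  -- the scatter loop, with the mapped values pulled into the zip
  have hfold : ∀ (sl rk : List Int) (r0 : List String),
      (sl.zip rk).foldl
          (fun r sr => r.set sr.1.toNat ((PySem.List.pyGet? l sr.2).getD "")) r0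
        = (sl.zip (rk.map (fun i => (PySem.List.pyGet? l i).getD ""))).foldl
            (fun r iv => r.set iv.1.toNat iv.2) r0 := by
    intro sl rk r0
    rw [List.zip_map_right, List.foldl_map]
    simp
  simp only [hfold, hslots, hranked]
  set on := PySem.List.sorted (l.filter pvNum) assignSignL false with hon
  set ow := PySem.List.sorted (l.filter (fun e => !pvNum e)) PySem.Str.lower false with how
  have hlon : (pvNPos l 0).length = on.length := by
    have := pvNPos_map l 0 l (by simp)
    rw [hon, PySem.List.length_sorted, ← this, List.length_map]
  rw [List.zip_append hlon, List.foldl_append]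
  rw [pvScatter l on ow (List.replicate l.length "") 0
      (by rw [hon, PySem.List.length_sorted])
      (by rw [how, PySem.List.length_sorted])
      (by simp)]
  simp

-- ===== VERDICT (by name: the statement is the Claim_ definition above) =====
theorem orderingProcess_spec : Claim_equal_orderingProcess := by
  intro l _ _
  show orderingProcess l = orderingProcess_alt l
  rw [pvA_eq, pvB_eq]
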